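-- pv_equiv track=rewrite | github.com/DeqingFu/TTIC-31110-Final-Project | otherdistance.py | _eqQianHouBi
-- ===== SOURCE A (Python) =====
-- def _eqQianHouBi(c1, c2):
--     tmp1 = c1
--     tmp2 = c2
--     fromLst = ['ang', 'eng', 'ing']
--     toLst = ['an', 'en', 'in']
--     for i in range(3):
--         tmp1 = tmp1.replace(fromLst[i], toLst[i])
--         tmp2 = tmp2.replace(fromLst[i], toLst[i])
--     return tmp1 == tmp2
-- ===== SOURCE B (Python) =====
-- def _eqQianHouBi(c1, c2):
--     def norm(s):
--         out = []
--         i = 0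
--         n = len(s)
--         while i < n:
--             if s[i] in 'aei' and s[i+1:i+3] == 'ng':
--                 out.append(s[i])
--                 out.append('n')
--                 i += 3
--             else:
--                 out.append(s[i])
--                 i += 1
--         return ''.join(out)
--     return norm(c1) == norm(c2)
-- ===== Notes on version B (the rewrite author's own statement) =====
-- stated objective: alternative
-- what changed: Replaced A's three sequential whole-string .replace passes (one per pattern ang/eng/ing) by a single left-to-right index scan per string that emits the vowel plus 'n' and skips 3 whenever s[i] is in 'aei' and s[i+1:i+3]=='ng'.
import Mathlib
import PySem

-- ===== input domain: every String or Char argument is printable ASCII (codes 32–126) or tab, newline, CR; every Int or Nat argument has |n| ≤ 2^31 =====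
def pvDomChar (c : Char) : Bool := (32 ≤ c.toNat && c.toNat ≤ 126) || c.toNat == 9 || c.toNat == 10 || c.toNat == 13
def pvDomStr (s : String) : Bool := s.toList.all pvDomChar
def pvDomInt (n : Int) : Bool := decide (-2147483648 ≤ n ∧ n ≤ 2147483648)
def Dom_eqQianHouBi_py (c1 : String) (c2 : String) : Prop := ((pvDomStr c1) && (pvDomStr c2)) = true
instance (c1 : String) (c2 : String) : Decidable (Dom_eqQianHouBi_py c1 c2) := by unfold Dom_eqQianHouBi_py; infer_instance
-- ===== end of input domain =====

-- B replaces A's three sequential .replace passes by ONE left-to-right scan per string that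
-- normalizes 'ang'/'eng'/'ing' to 'an'/'en'/'in' (objective: alternative single-pass algorithm).

-- ===== PORT A =====
-- A: tmp = s; for i in range(3): tmp = tmp.replace(fromLst[i], toLst[i]); then tmp1 == tmp2.
def eqQianHouBi_py (c1 : String) (c2 : String) : Bool :=
  let tmp1 := c1
  let tmp2 := c2
  let fromLst : List String := ["ang", "eng", "ing"]
  let toLst : List String := ["an", "en", "in"]
  let st := (PySem.List.pyRange 0 3 1).foldl
    (fun (st : String × String) i =>
      (PySem.Str.replace st.1 ((PySem.List.pyGet? fromLst i).getD "") ((PySem.List.pyGet? toLst i).getD ""),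
       PySem.Str.replace st.2 ((PySem.List.pyGet? fromLst i).getD "") ((PySem.List.pyGet? toLst i).getD "")))
    (tmp1, tmp2)
  st.1 == st.2

-- ===== PORT B =====
-- B's norm: one scan; at each position, if the char is 'a'/'e'/'i' and the next two chars
-- (s[i+1:i+3]) are "ng", emit the char and 'n' and skip 3, else emit the char and advance 1.
def normChars : List Char → List Char
  | [] => []
  | c :: t =>
    if (c = 'a' ∨ c = 'e' ∨ c = 'i') ∧ t.take 2 = ['n', 'g'] then c :: 'n' :: normChars (t.drop 2)
    else c :: normChars t
termination_by l => l.length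
decreasing_by all_goals (simp; try omega)

def eqQianHouBi_py_alt (c1 : String) (c2 : String) : Bool :=
  String.ofList (normChars c1.toList) == String.ofList (normChars c2.toList)

-- ===== PRECONDITION & SPEC =====
def Spec_eqQianHouBi_py (c1 : String) (c2 : String) (out : Bool) : Prop := out = eqQianHouBi_py_alt c1 c2
instance (c1 : String) (c2 : String) (out : Bool) : Decidable (Spec_eqQianHouBi_py c1 c2 out) := by unfold Spec_eqQianHouBi_py; infer_instance

-- ===== CLAIM (what is proved, stated in full; the proofs are below) =====
def Claim_equal_eqQianHouBi_py : Prop := ∀ (c1 : String) (c2 : String), Dom_eqQianHouBi_py c1 c2 → Spec_eqQianHouBi_py c1 c2 (eqQianHouBi_py c1 c2)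

-- ===== LEMMAS AND PROOFS =====

/-- One Python-style `replace` pass for the pattern `[x,'n','g'] → [x,'n']`. -/
def repP (x : Char) : List Char → List Char
  | c1 :: c2 :: c3 :: t =>
    if c1 = x ∧ c2 = 'n' ∧ c3 = 'g' then c1 :: 'n' :: repP x t
    else c1 :: repP x (c2 :: c3 :: t)
  | c :: t => c :: repP x t
  | [] => []

lemma repP_cons_of_ne (x c : Char) (m : List Char) (h : c ≠ x) :
    repP x (c :: m) = c :: repP x m := by
  match m with
  | [] => simp [repP]
  | [c2] => simp [repP]
  | c2 :: c3 :: t => simp [repP, h]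

lemma repP_cons_of_take2 (x c : Char) (m : List Char) (h : m.take 2 ≠ ['n', 'g']) :
    repP x (c :: m) = c :: repP x m := by
  match m with
  | [] => simp [repP]
  | [c2] => simp [repP]
  | c2 :: c3 :: t =>
    have : ¬ (c = x ∧ c2 = 'n' ∧ c3 = 'g') := by
      rintro ⟨-, h2, h3⟩; exact h (by simp [h2, h3])
    simp [repP, this]

lemma repP_take1 (x : Char) (l : List Char) : (repP x l).take 1 = l.take 1 := by
  match l with
  | [] => rfl
  | [c] => simp [repP]
  | [c1, c2] => simp [repP]
  | c1 :: c2 :: c3 :: t => by_cases h : c1 = x ∧ c2 = 'n' ∧ c3 = 'g' <;> simp [repP, h]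

lemma repP_take2 (x : Char) (l : List Char) : (repP x l).take 2 = l.take 2 := by
  match l with
  | [] => rfl
  | [c] => simp [repP]
  | [c1, c2] => simp [repP]
  | c1 :: c2 :: c3 :: t =>
    by_cases h : c1 = x ∧ c2 = 'n' ∧ c3 = 'g'
    · obtain ⟨h1, h2, h3⟩ := h
      subst h1; subst h2; subst h3
      simp [repP]
    · have h1 := repP_take1 x (c2 :: c3 :: t)
      cases hr : repP x (c2 :: c3 :: t) with
      | nil => rw [hr] at h1; simp at h1
      | cons d ds =>
        rw [hr] at h1
        simp only [List.take_succ_cons, List.take_zero] at h1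
        simp [repP, h, hr]
        simpa using h1

/-- `Chars.replace.go` computes `repP`. -/
lemma go_eq_repP (x : Char) :
    ∀ (fuel : Nat) (l acc : List Char), l.length ≤ fuel →
      PySem.Chars.replace.go [x, 'n', 'g'] [x, 'n'] fuel l acc = acc.reverse ++ repP x l := by
  intro fuel
  induction fuel with
  | zero =>
    intro l acc h
    have : l = [] := by cases l <;> simp_all
    subst this
    simp [PySem.Chars.replace.go, repP]
  | succ n ih =>
    intro l acc h
    match l with
    | [] => simp [PySem.Chars.replace.go, repP]
    | c1 :: t =>
      match t with
      | [] =>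
        have hp : List.isPrefixOf [x, 'n', 'g'] [c1] = false := by
          simp [List.isPrefixOf]
        simp only [PySem.Chars.replace.go, hp, Bool.false_eq_true, if_false]
        rw [ih [] (c1 :: acc) (by simp)]
        simp [repP]
      | [c2] =>
        have hp : List.isPrefixOf [x, 'n', 'g'] [c1, c2] = false := by
          simp [List.isPrefixOf]
        simp only [PySem.Chars.replace.go, hp, Bool.false_eq_true, if_false]
        rw [ih [c2] (c1 :: acc) (by simp at h ⊢; omega)]
        simp [repP]
      | c2 :: c3 :: t' =>
        by_cases hm : c1 = x ∧ c2 = 'n' ∧ c3 = 'g'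
        · obtain ⟨h1, h2, h3⟩ := hm
          subst h1; subst h2; subst h3
          have hp : List.isPrefixOf [c1, 'n', 'g'] (c1 :: 'n' :: 'g' :: t') = true := by
            simp [List.isPrefixOf]
          simp only [PySem.Chars.replace.go, hp, if_true]
          rw [ih (List.drop [c1, 'n', 'g'].length (c1 :: 'n' :: 'g' :: t')) _ (by simp at h ⊢; omega)]
          simp [repP]
        · have hp : List.isPrefixOf [x, 'n', 'g'] (c1 :: c2 :: c3 :: t') = false := by
            simp only [List.isPrefixOf]
            by_contra hc
            simp only [Bool.not_eq_false, Bool.and_eq_true, beq_iff_eq] at hc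
            exact hm ⟨hc.1.symm, hc.2.1.symm, (by simpa using hc.2.2 : ('g' : Char) = c3).symm⟩
          simp only [PySem.Chars.replace.go, hp, Bool.false_eq_true, if_false]
          rw [ih (c2 :: c3 :: t') (c1 :: acc) (by simp at h ⊢; omega)]
          simp [repP, hm]

lemma replace_eq_repP (x : Char) (l : List Char) :
    PySem.Chars.replace l [x, 'n', 'g'] [x, 'n'] = repP x l := by
  rw [PySem.Chars.replace]
  simp only [List.isEmpty_cons, Bool.false_eq_true, if_false]
  exact go_eq_repP x l.length l [] (le_refl _)

/-- The three sequential passes equal the one combined pass. -/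
lemma three_passes_eq_norm : ∀ (n : Nat) (l : List Char), l.length ≤ n →
    repP 'i' (repP 'e' (repP 'a' l)) = normChars l := by
  intro n
  induction n with
  | zero =>
    intro l h
    have : l = [] := by cases l <;> simp_all
    subst this; simp [repP, normChars]
  | succ n ih =>
    intro l h
    match l with
    | [] => simp [repP, normChars]
    | c :: t =>
      by_cases hng : t.take 2 = ['n', 'g']
      · -- t starts with 'n','g'
        rcases t with _ | ⟨a, t2⟩
        · simp at hng
        rcases t2 with _ | ⟨b, t'⟩
        · simp at hng
        obtain ⟨ha, hb⟩ : a = 'n' ∧ b = 'g' := by simpa using hng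
        subst ha; subst hb
        by_cases hc : c = 'a' ∨ c = 'e' ∨ c = 'i'
        · rcases hc with h1 | h1 | h1 <;> subst h1
          · -- 'a' :: 'n' :: 'g' :: t'
            have e1 : repP 'a' ('a' :: 'n' :: 'g' :: t') = 'a' :: 'n' :: repP 'a' t' := by
              simp [repP]
            rw [e1, repP_cons_of_ne 'e' 'a' _ (by decide),
                repP_cons_of_ne 'e' 'n' _ (by decide),
                repP_cons_of_ne 'i' 'a' _ (by decide),
                repP_cons_of_ne 'i' 'n' _ (by decide),
                ih t' (by simp at h; omega)]
            simp [normChars]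
          · -- 'e' :: 'n' :: 'g' :: t'
            rw [repP_cons_of_ne 'a' 'e' _ (by decide),
                repP_cons_of_ne 'a' 'n' _ (by decide),
                repP_cons_of_ne 'a' 'g' _ (by decide)]
            have e2 : repP 'e' ('e' :: 'n' :: 'g' :: repP 'a' t') =
                'e' :: 'n' :: repP 'e' (repP 'a' t') := by simp [repP]
            rw [e2, repP_cons_of_ne 'i' 'e' _ (by decide),
                repP_cons_of_ne 'i' 'n' _ (by decide),
                ih t' (by simp at h; omega)]
            simp [normChars]
          · -- 'i' :: 'n' :: 'g' :: t'
            rw [repP_cons_of_ne 'a' 'i' _ (by decide),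
                repP_cons_of_ne 'a' 'n' _ (by decide),
                repP_cons_of_ne 'a' 'g' _ (by decide),
                repP_cons_of_ne 'e' 'i' _ (by decide),
                repP_cons_of_ne 'e' 'n' _ (by decide),
                repP_cons_of_ne 'e' 'g' _ (by decide)]
            have e3 : repP 'i' ('i' :: 'n' :: 'g' :: repP 'e' (repP 'a' t')) =
                'i' :: 'n' :: repP 'i' (repP 'e' (repP 'a' t')) := by simp [repP]
            rw [e3, ih t' (by simp at h; omega)]
            simp [normChars]
        · -- head not in {a,e,i}: all passes just step over c
          have ha : c ≠ 'a' := fun hh => hc (Or.inl hh)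
          have he : c ≠ 'e' := fun hh => hc (Or.inr (Or.inl hh))
          have hi : c ≠ 'i' := fun hh => hc (Or.inr (Or.inr hh))
          rw [repP_cons_of_ne 'a' c _ ha,
              repP_cons_of_ne 'e' c _ he,
              repP_cons_of_ne 'i' c _ hi,
              ih ('n' :: 'g' :: t') (by simp at h ⊢; omega)]
          simp [normChars, hc]
      · -- t does not start with "ng": every pass steps over c, and so does normChars
        have hA : (repP 'a' t).take 2 ≠ ['n', 'g'] := by rw [repP_take2]; exact hng
        have hE : (repP 'e' (repP 'a' t)).take 2 ≠ ['n', 'g'] := by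
          rw [repP_take2, repP_take2]; exact hng
        rw [repP_cons_of_take2 'a' c t hng,
            repP_cons_of_take2 'e' c _ hA,
            repP_cons_of_take2 'i' c _ hE,
            ih t (by simp at h; omega)]
        simp [normChars, hng]

lemma port_a_unfold (s : String) :
    (PySem.Str.replace (PySem.Str.replace (PySem.Str.replace s "ang" "an") "eng" "en") "ing" "in")
      = String.ofList (normChars s.toList) := by
  rw [← String.toList_inj, String.toList_ofList]
  simp only [PySem.Str.toList_replace]
  show PySem.Chars.replace (PySem.Chars.replace (PySem.Chars.replace s.toList
      ['a','n','g'] ['a','n']) ['e','n','g'] ['e','n']) ['i','n','g'] ['i','n'] = _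
  rw [replace_eq_repP 'a', replace_eq_repP 'e', replace_eq_repP 'i']
  exact three_passes_eq_norm s.toList.length s.toList (le_refl _)

-- ===== VERDICT (by name: the statement is the Claim_ definition above) =====
theorem eqQianHouBi_py_spec : Claim_equal_eqQianHouBi_py := by
  intro c1 c2 _
  show eqQianHouBi_py c1 c2 = eqQianHouBi_py_alt c1 c2
  unfold eqQianHouBi_py eqQianHouBi_py_alt
  have hrange : PySem.List.pyRange 0 3 1 = [0, 1, 2] := by decide
  have g00 : (PySem.List.pyGet? ["ang", "eng", "ing"] 0).getD "" = "ang" := by decide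
  have g01 : (PySem.List.pyGet? ["ang", "eng", "ing"] 1).getD "" = "eng" := by decide
  have g02 : (PySem.List.pyGet? ["ang", "eng", "ing"] 2).getD "" = "ing" := by decide
  have g10 : (PySem.List.pyGet? ["an", "en", "in"] 0).getD "" = "an" := by decide
  have g11 : (PySem.List.pyGet? ["an", "en", "in"] 1).getD "" = "en" := by decide
  have g12 : (PySem.List.pyGet? ["an", "en", "in"] 2).getD "" = "in" := by decide
  simp only [hrange, List.foldl, g00, g01, g02, g10, g11, g12]
  rw [port_a_unfold c1, port_a_unfold c2]
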